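-- pv_equiv track=rewrite | github.com/temesgen5335/LeetCode_challenges | medium/minimum_number_of_times_to_type_word.py | min_pushes_to_type_word
-- ===== SOURCE A (Python) =====
-- from collections import Counter
--
-- def min_pushes_to_type_word(word):
--     # Step 1: Count the frequency of each character in the word
--     char_count = Counter(word)
--
--     # Step 2: Get the frequencies sorted in descending order
--     frequencies = sorted(char_count.values(), reverse=True)
--
--     # Step 3: Calculate the minimum pushes required
--     total_pushes = 0
--     presses_per_key = 1  # Start with 1 push for the first key
--
--     for i, freq in enumerate(frequencies):
--         # Determine how many presses are needed based on the index
--         total_pushes += freq * presses_per_key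
--
--         # Every 3 letters will increase the presses needed
--         if (i + 1) % 3 == 0:
--             presses_per_key += 1
--
--     return total_pushes
-- ===== SOURCE B (Python) =====
-- def min_pushes_to_type_word(word):
--     # Counting-sort approach: no comparison sort. Tally character frequencies,
--     # then tally frequencies-of-frequencies, and walk possible frequency values
--     # from len(word) down to 1, assigning each occurrence its rank-based cost.
--     freq = {}
--     for ch in word:
--         freq[ch] = freq.get(ch, 0) + 1
--     buckets = {}
--     for f in freq.values():
--         buckets[f] = buckets.get(f, 0) + 1
--     total = 0
--     rank = 0
--     for f in range(len(word), 0, -1):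
--         for _ in range(buckets.get(f, 0)):
--             total += (rank // 3 + 1) * f
--             rank += 1
--     return total
-- ===== Notes on version B (the rewrite author's own statement) =====
-- stated objective: alternative
-- what changed: replaces the comparison sort of frequencies and the per-element tier loop by a counting-sort scheme: a frequency-of-frequencies bucket table scanned from len(word) down to 1, charging each occurrence rank//3+1 presses
import Mathlib
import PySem

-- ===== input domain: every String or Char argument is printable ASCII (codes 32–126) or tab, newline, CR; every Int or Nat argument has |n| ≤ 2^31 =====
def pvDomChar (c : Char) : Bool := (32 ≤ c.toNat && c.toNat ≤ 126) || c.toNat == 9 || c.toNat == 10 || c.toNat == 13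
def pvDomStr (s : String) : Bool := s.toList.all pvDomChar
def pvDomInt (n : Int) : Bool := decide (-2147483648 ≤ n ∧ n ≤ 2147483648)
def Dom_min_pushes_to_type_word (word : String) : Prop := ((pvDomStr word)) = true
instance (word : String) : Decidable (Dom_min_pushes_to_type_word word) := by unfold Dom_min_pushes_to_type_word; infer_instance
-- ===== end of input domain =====

-- B replaces A's comparison sort of the frequencies and its per-element tier loop by a
-- counting-sort scheme: a frequency-of-frequencies bucket table scanned from len(word)
-- down to 1, charging each occurrence rank//3+1 presses.

-- ===== PORT A =====
def min_pushes_to_type_word (word : String) : Int :=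
  let char_count := PySem.Dict.counter word.toList
  let frequencies := PySem.List.sorted char_count.values (fun x => x) true
  let r := (PySem.List.enumerate frequencies 0).foldl
    (fun (st : Int × Int) (p : Int × Int) =>
      let st1 : Int × Int := (st.1 + p.2 * st.2, st.2)
      if PySem.Int.mod (p.1 + 1) 3 == 0 then (st1.1, st1.2 + 1) else st1)
    (0, 1)
  r.1

-- ===== PORT B =====
def min_pushes_to_type_word_alt (word : String) : Int :=
  let freq := word.toList.foldl
    (fun (d : PySem.Dict Char Int) ch => d.insert ch (d.getD ch 0 + 1)) PySem.Dict.empty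
  let buckets := freq.values.foldl
    (fun (d : PySem.Dict Int Int) f => d.insert f (d.getD f 0 + 1)) PySem.Dict.empty
  let r := (PySem.List.pyRange (PySem.Str.len word) 0 (-1)).foldl
    (fun (st : Int × Int) f =>
      (PySem.List.pyRange 0 (buckets.getD f 0) 1).foldl
        (fun (st : Int × Int) _ => (st.1 + (PySem.Int.floordiv st.2 3 + 1) * f, st.2 + 1)) st)
    (0, 0)
  r.1

-- ===== PRECONDITION & SPEC =====
def Spec_min_pushes_to_type_word (word : String) (out : Int) : Prop := out = min_pushes_to_type_word_alt word
instance (word : String) (out : Int) : Decidable (Spec_min_pushes_to_type_word word out) := by unfold Spec_min_pushes_to_type_word; infer_instance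

-- ===== CLAIM (what is proved, stated in full; the proofs are below) =====
def Claim_equal_min_pushes_to_type_word : Prop := ∀ (word : String), Dom_min_pushes_to_type_word word → Spec_min_pushes_to_type_word word (min_pushes_to_type_word word)

-- ===== LEMMAS AND PROOFS =====

-- the common "charge one occurrence of value x at rank st.2" step
def pvStep (st : Int × Int) (x : Int) : Int × Int :=
  (st.1 + (PySem.Int.floordiv st.2 3 + 1) * x, st.2 + 1)

-- A's loop body as a named function (definitionally A's lambda)
def pvAStep (st : Int × Int) (p : Int × Int) : Int × Int :=
  let st1 : Int × Int := (st.1 + p.2 * st.2, st.2)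
  if PySem.Int.mod (p.1 + 1) 3 == 0 then (st1.1, st1.2 + 1) else st1

-- A's element-wise loop, started at index i with presses_per_key i/3+1, is the pvStep fold
theorem pvALoop (l : List Int) (i : Nat) (t : Int) :
    ((PySem.List.enumerate l (i : Int)).foldl pvAStep (t, ((i / 3 : Nat) : Int) + 1)).1
    = (l.foldl pvStep (t, (i : Int))).1 := by
  induction l generalizing i t with
  | nil => simp [PySem.List.enumerate_nil]
  | cons a l ih =>
    rw [PySem.List.enumerate_cons, List.foldl_cons, List.foldl_cons]
    have hdiv : PySem.Int.floordiv (i : Int) 3 = ((i / 3 : Nat) : Int) :=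
      by exact_mod_cast PySem.Int.floordiv_natCast i 3
    have hstep : pvStep (t, (i : Int)) a = (t + a * (((i / 3 : Nat) : Int) + 1), ((i + 1 : Nat) : Int)) := by
      simp only [pvStep, hdiv, Prod.mk.injEq]
      constructor
      · ring
      · push_cast; ring
    rw [hstep]
    by_cases h3 : 3 ∣ (i + 1)
    · have hc : (3 : Int) ∣ ((i : Int) + 1) := by exact_mod_cast (by exact_mod_cast h3 : (3 : Int) ∣ ((i + 1 : Nat) : Int))
      have hm : PySem.Int.mod ((i : Int) + 1) 3 = 0 := (PySem.Int.mod_eq_zero_iff_dvd _ _).mpr hc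
      have hAs : pvAStep (t, ((i / 3 : Nat) : Int) + 1) ((i : Int), a)
          = (t + a * (((i / 3 : Nat) : Int) + 1), (((i + 1) / 3 : Nat) : Int) + 1) := by
        have hq : (i + 1) / 3 = i / 3 + 1 := by omega
        simp only [pvAStep, hm, hq, beq_self_eq_true, if_true, Prod.mk.injEq]
        refine ⟨trivial, by push_cast; omega⟩
      rw [hAs]
      exact ih (i + 1) _
    · have hc : ¬ (3 : Int) ∣ ((i : Int) + 1) := by
        intro h
        exact h3 (by exact_mod_cast (by push_cast at h ⊢; exact h : (3 : Int) ∣ ((i + 1 : Nat) : Int)))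
      have hm : ¬ PySem.Int.mod ((i : Int) + 1) 3 = 0 := fun h => hc ((PySem.Int.mod_eq_zero_iff_dvd _ _).mp h)
      have hAs : pvAStep (t, ((i / 3 : Nat) : Int) + 1) ((i : Int), a)
          = (t + a * (((i / 3 : Nat) : Int) + 1), (((i + 1) / 3 : Nat) : Int) + 1) := by
        have hq : (i + 1) / 3 = i / 3 := by omega
        simp only [pvAStep, hq, beq_iff_eq, if_neg hm]
      rw [hAs]
      exact ih (i + 1) _

-- a fold that ignores its list element is a fold over a replicate of the same length
theorem pvFoldIgnore (l : List Int) (f : Int) (st : Int × Int) :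
    l.foldl (fun st _ => pvStep st f) st = (List.replicate l.length f).foldl pvStep st := by
  induction l generalizing st with
  | nil => rfl
  | cons a l ih => simp only [List.foldl_cons, List.length_cons, List.replicate_succ]; exact ih _

-- the descending counting-sort output: values n, n-1, …, 1, each repeated its multiplicity in V
def pvDesc (V : List Int) : Nat → List Int
  | 0 => []
  | n + 1 => List.replicate (V.count ((n : Int) + 1)) ((n : Int) + 1) ++ pvDesc V n

theorem pvDesc_mem (V : List Int) (n : Nat) (x : Int) (hx : x ∈ pvDesc V n) :
    1 ≤ x ∧ x ≤ (n : Int) := by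
  induction n with
  | zero => simp [pvDesc] at hx
  | succ n ih =>
    simp only [pvDesc, List.mem_append, List.mem_replicate] at hx
    rcases hx with ⟨-, rfl⟩ | h
    · constructor <;> omega
    · have := ih h; push_cast; omega

theorem pvDesc_pairwise (V : List Int) (n : Nat) :
    (pvDesc V n).Pairwise (fun a b => b ≤ a) := by
  induction n with
  | zero => simp [pvDesc]
  | succ n ih =>
    simp only [pvDesc]
    refine List.pairwise_append.mpr ⟨List.pairwise_replicate.mpr (Or.inr le_rfl), ih, ?_⟩
    intro a ha b hb
    rcases List.mem_replicate.mp ha with ⟨-, rfl⟩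
    have := pvDesc_mem V n b hb
    omega

theorem pvDesc_count (V : List Int) (n : Nat) (x : Int) :
    (pvDesc V n).count x = if 1 ≤ x ∧ x ≤ (n : Int) then V.count x else 0 := by
  induction n with
  | zero =>
    simp only [pvDesc, List.count_nil, Nat.cast_zero]
    rw [if_neg (by omega)]
  | succ n ih =>
    simp only [pvDesc, List.count_append, List.count_replicate, ih]
    by_cases hx : x = (n : Int) + 1
    · subst hx
      have h2 : (1 : Int) ≤ (n : Int) + 1 ∧ (n : Int) + 1 ≤ ((n + 1 : Nat) : Int) := by push_cast; omega
      simp [h2]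
    · have hne : ¬ ((n : Int) + 1 = x) := fun h => hx h.symm
      have : ((1 : Int) ≤ x ∧ x ≤ (n : Int)) ↔ (1 ≤ x ∧ x ≤ ((n + 1 : Nat) : Int)) := by
        push_cast; omega
      simp [hne, this]

theorem pvDesc_perm (V : List Int) (n : Nat)
    (hb : ∀ v ∈ V, 1 ≤ v ∧ v ≤ (n : Int)) : (pvDesc V n).Perm V := by
  refine List.perm_iff_count.mpr fun x => ?_
  rw [pvDesc_count]
  split_ifs with h
  · rfl
  · refine (List.count_eq_zero.mpr fun hx => ?_).symm
    exact h (hb x hx)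

-- counting sort agrees with sorted(·, reverse=True)
theorem pvDesc_eq_sorted (V : List Int) (n : Nat)
    (hb : ∀ v ∈ V, 1 ≤ v ∧ v ≤ (n : Int)) :
    PySem.List.sorted V (fun x => x) true = pvDesc V n := by
  have hperm : (PySem.List.sorted V (fun x => x) true).Perm (pvDesc V n) :=
    (PySem.List.sorted_perm V (fun x => x) true).trans (pvDesc_perm V n hb).symm
  have hs1 : (PySem.List.sorted V (fun x => x) true).Pairwise (fun a b : Int => b ≤ a) :=
    PySem.List.sorted_pairwise_rev V (fun x => x)
  have hs2 : (pvDesc V n).Pairwise (fun a b : Int => b ≤ a) := pvDesc_pairwise V n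
  exact hperm.eq_of_pairwise (fun a b _ _ h1 h2 => le_antisymm h2 h1) hs1 hs2

-- B's outer countdown loop is the pvStep fold over pvDesc
theorem pvBLoop (V : List Int) (n : Nat) (st : Int × Int) :
    (PySem.List.pyRange (n : Int) 0 (-1)).foldl
      (fun (st : Int × Int) f =>
        (PySem.List.pyRange 0 ((PySem.Dict.counter V).getD f 0) 1).foldl
          (fun (st : Int × Int) _ => (st.1 + (PySem.Int.floordiv st.2 3 + 1) * f, st.2 + 1)) st)
      st
    = (pvDesc V n).foldl pvStep st := by
  induction n generalizing st with
  | zero => rw [PySem.List.pyRange_neg_one_eq_nil (by norm_num)]; rfl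
  | succ n ih =>
    have hpos : (0 : Int) < ((n + 1 : Nat) : Int) := by positivity
    rw [PySem.List.pyRange_neg_one_cons hpos]
    simp only [List.foldl_cons, pvDesc, List.foldl_append]
    have hc : ((n + 1 : Nat) : Int) - 1 = (n : Int) := by push_cast; ring
    rw [hc, PySem.Dict.getD_counter]
    have hinner : ∀ (m : Nat) (f : Int) (st : Int × Int),
        (PySem.List.pyRange 0 (m : Int) 1).foldl
          (fun (st : Int × Int) _ => (st.1 + (PySem.Int.floordiv st.2 3 + 1) * f, st.2 + 1)) st
        = (List.replicate m f).foldl pvStep st := by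
      intro m f st
      have := pvFoldIgnore (PySem.List.pyRange 0 (m : Int) 1) f st
      simp only [pvStep] at this ⊢
      rw [this, PySem.List.length_pyRange_one]
      simp
    rw [hinner (V.count ((n + 1 : Nat) : Int)) ((n + 1 : Nat) : Int) st]
    have hc2 : ((n + 1 : Nat) : Int) = (n : Int) + 1 := by push_cast; ring
    rw [hc2]
    exact ih _

-- the frequencies are between 1 and the word length
theorem pvValuesBound (xs : List Char) :
    ∀ v ∈ (PySem.Dict.counter xs).values, 1 ≤ v ∧ v ≤ (xs.length : Int) := by
  intro v hv
  have : (PySem.Dict.counter xs).values = (PySem.Dict.counter xs).items.map (·.2) := rfl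
  rw [this, PySem.Dict.items_counter] at hv
  simp only [List.map_map, List.mem_map, Function.comp] at hv
  obtain ⟨k, hk, rfl⟩ := hv
  have hk' : k ∈ xs := by
    exact (PySem.Set.mem_ofList xs k).mp hk
  constructor
  · exact_mod_cast List.count_pos_iff.mpr hk'
  · exact_mod_cast List.count_le_length

-- ===== VERDICT (by name: the statement is the Claim_ definition above) =====
theorem min_pushes_to_type_word_spec : Claim_equal_min_pushes_to_type_word := by
  intro word _
  show _ = _
  simp only [min_pushes_to_type_word, min_pushes_to_type_word_alt]
  rw [PySem.Dict.foldl_insert_getD_add_one_eq_counter]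
  set V := (PySem.Dict.counter word.toList).values with hV
  rw [PySem.Dict.foldl_insert_getD_add_one_eq_counter]
  have hlen : PySem.Str.len word = ((word.toList.length : Nat) : Int) := by
    simp [PySem.Str.len_eq]
  rw [hlen, pvBLoop V word.toList.length (0, 0),
    ← pvDesc_eq_sorted V word.toList.length (pvValuesBound word.toList)]
  have hfun : (fun (st : Int × Int) (p : Int × Int) =>
      if (PySem.Int.mod (p.1 + 1) 3 == 0) = true then (st.1 + p.2 * st.2, st.2 + 1)
      else (st.1 + p.2 * st.2, st.2)) = pvAStep := by
    funext st p
    simp only [pvAStep]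
  rw [hfun]
  simpa using pvALoop (PySem.List.sorted V (fun x => x) true) 0 0
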